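-- pv_equiv track=rewrite | github.com/Deepanshusharwan/peppy | src/utils/app_scorer.py | find_ordered_subsequence
-- ===== SOURCE A (Python) =====
-- def find_ordered_subsequence(query: str, target: str) -> list[int] | None:
--     """
--     Find the ordered subsequence of the query string in the target string.
--
--     If found, returns a list of indices in the target string where each character
--     in the query string appears in order.
--     If the sequence is not found in order, returns None.
--     """
--     indices = []
--     # Starting position for search in the target string
--     current_pos_in_target = 0
--
--     for char_in_query in query:
--         # Search for the current character starting from the last found position
--         found_at = target.find(char_in_query, current_pos_in_target)
--
--         # If not found, return None to indicate failed match
--         if found_at == -1: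
--             return None
--
--         # Record the found index and update the starting position for the next search
--         indices.append(found_at)
--         current_pos_in_target = found_at + 1
--
--     return indices
-- ===== SOURCE B (Python) =====
-- def find_ordered_subsequence(query: str, target: str) -> list[int] | None:
--     """Inverted index + binary search: precompute char -> sorted positions,
--     then binary-search the first position >= pos for each query character."""
--     positions = {}
--     for i, ch in enumerate(target):
--         positions.setdefault(ch, []).append(i)
--     indices = []
--     pos = 0
--     for ch in query:
--         lst = positions.get(ch, [])
--         lo, hi = 0, len(lst)
--         while lo < hi:
--             mid = (lo + hi) // 2
--             if lst[mid] < pos: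
--                 lo = mid + 1
--             else:
--                 hi = mid
--         if lo == len(lst):
--             return None
--         indices.append(lst[lo])
--         pos = lst[lo] + 1
--     return indices
-- ===== Notes on version B (the rewrite author's own statement) =====
-- stated objective: alternative
-- what changed: Replaced A's per-query-character scans of target (repeated target.find(ch, pos)) with a precomputed inverted index (char -> sorted list of positions) queried by a hand-written binary search for the first position >= pos, so target is traversed only once during preprocessing.
import Mathlib
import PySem

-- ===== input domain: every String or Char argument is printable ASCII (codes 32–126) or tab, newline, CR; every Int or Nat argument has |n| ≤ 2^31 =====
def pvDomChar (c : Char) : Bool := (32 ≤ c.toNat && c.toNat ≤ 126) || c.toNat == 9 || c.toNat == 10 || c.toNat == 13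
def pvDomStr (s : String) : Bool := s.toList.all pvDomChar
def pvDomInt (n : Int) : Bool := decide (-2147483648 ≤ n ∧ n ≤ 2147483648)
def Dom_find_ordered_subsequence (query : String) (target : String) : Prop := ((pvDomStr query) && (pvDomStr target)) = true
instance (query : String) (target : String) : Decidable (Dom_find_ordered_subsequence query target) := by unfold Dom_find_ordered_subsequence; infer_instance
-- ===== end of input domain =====

-- B replaces A's repeated target.find(ch, pos) scans by an inverted index (char -> sorted positions)
-- queried with a hand-written binary search (objective: alternative algorithm).

-- ===== PORT A =====
-- A's for-loop over the query characters, carrying (indices, current_pos_in_target).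
def fosA_go (target : String) : List Char → Int → List Int → Option (List Int)
  | [], _, acc => some acc
  | c :: qs, pos, acc =>
    let found := PySem.Str.findFrom target (String.singleton c) pos none
    if found = -1 then none
    else fosA_go target qs (found + 1) (acc ++ [found])

def find_ordered_subsequence (query : String) (target : String) : Option (List Int) :=
  fosA_go target query.toList 0 []

-- ===== PORT B =====
-- B's preprocessing loop: positions.setdefault(ch, []).append(i) over enumerate(target).
def fosB_build (target : List Char) : PySem.Dict Char (List Int) :=
  (PySem.List.enumerate target 0).foldl (fun d p => d.modify p.2 [] (· ++ [p.1])) PySem.Dict.empty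

-- B's while-loop binary search: first index in [lo, hi) whose element is >= pos.
def fosB_bsearch (lst : List Int) (pos : Int) (lo hi : Nat) : Nat :=
  if _h : lo < hi then
    let mid := (lo + hi) / 2
    if lst.getD mid 0 < pos then fosB_bsearch lst pos (mid + 1) hi
    else fosB_bsearch lst pos lo mid
  else lo
termination_by hi - lo
decreasing_by all_goals omega

-- B's for-loop over the query characters, carrying (indices, pos).
def fosB_go (positions : PySem.Dict Char (List Int)) : List Char → Int → List Int → Option (List Int)
  | [], _, acc => some acc
  | ch :: qs, pos, acc =>
    let lst := positions.getD ch []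
    let lo := fosB_bsearch lst pos 0 lst.length
    if lo = lst.length then none
    else fosB_go positions qs (lst.getD lo 0 + 1) (acc ++ [lst.getD lo 0])

def find_ordered_subsequence_alt (query : String) (target : String) : Option (List Int) :=
  fosB_go (fosB_build target.toList) query.toList 0 []

-- ===== PRECONDITION & SPEC =====
def Spec_find_ordered_subsequence (query : String) (target : String) (out : Option (List Int)) : Prop := out = find_ordered_subsequence_alt query target
instance (query : String) (target : String) (out : Option (List Int)) : Decidable (Spec_find_ordered_subsequence query target out) := by unfold Spec_find_ordered_subsequence; infer_instance

-- ===== CLAIM (what is proved, stated in full; the proofs are below) =====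
def Claim_equal_find_ordered_subsequence : Prop := ∀ (query : String) (target : String), Dom_find_ordered_subsequence query target → Spec_find_ordered_subsequence query target (find_ordered_subsequence query target)

-- ===== LEMMAS AND PROOFS =====

-- The occurrence list of q in s: the positions of q in s, in increasing order.
def fosOcc (s : List Char) (q : Char) : List Int :=
  ((PySem.List.enumerate s 0).filter (fun p => p.2 == q)).map (·.1)

-- B's index maps each character to its occurrence list.
lemma fosB_build_getD (s : List Char) (q : Char) :
    (fosB_build s).getD q [] = fosOcc s q := by
  unfold fosB_build fosOcc
  have h := List.foldl_map (f := fun p : Int × Char => (p.2, p.1))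
    (g := fun d p => PySem.Dict.modify d p.1 ([] : List Int) (· ++ [p.2]))
    (l := PySem.List.enumerate s 0) (init := (PySem.Dict.empty : PySem.Dict Char (List Int)))
  simp only at h
  rw [← h, PySem.Dict.getD_foldl_modify_append]
  simp [List.filter_map, Function.comp_def]

lemma fosOcc_sorted (s : List Char) (q : Char) : (fosOcc s q).Pairwise (· < ·) := by
  unfold fosOcc
  exact List.pairwise_map.mpr ((PySem.List.pairwise_lt_enumerate (xs := s) (s := 0)).filter _)

lemma mem_fosOcc (s : List Char) (q : Char) (x : Int) :
    x ∈ fosOcc s q ↔ ∃ m : Nat, x = (m : Int) ∧ s[m]? = some q := by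
  unfold fosOcc
  simp [PySem.List.mem_enumerate_iff, List.getElem?_eq_some_iff]

lemma getD_lt_getD (lst : List Int) (hs : lst.Pairwise (· < ·)) (i j : Nat)
    (hij : i < j) (hj : j < lst.length) : lst.getD i 0 < lst.getD j 0 := by
  rw [List.getD_eq_getElem _ _ (by omega), List.getD_eq_getElem _ _ hj]
  exact List.pairwise_iff_getElem.mp hs i j (by omega) hj hij

-- Invariant of B's binary-search loop: the result splits lst into < pos and ≥ pos.
lemma fosB_bsearch_inv (lst : List Int) (pos : Int) (hs : lst.Pairwise (· < ·)) :
    ∀ fuel lo hi, hi - lo ≤ fuel → lo ≤ hi → hi ≤ lst.length →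
    (∀ i : Nat, i < lo → lst.getD i 0 < pos) →
    (∀ i : Nat, hi ≤ i → i < lst.length → pos ≤ lst.getD i 0) →
    fosB_bsearch lst pos lo hi ≤ hi ∧
      (∀ i : Nat, i < fosB_bsearch lst pos lo hi → lst.getD i 0 < pos) ∧
      (∀ i : Nat, fosB_bsearch lst pos lo hi ≤ i → i < lst.length → pos ≤ lst.getD i 0) := by
  intro fuel
  induction fuel with
  | zero =>
    intro lo hi hf hlh hhl h1 h2
    rw [fosB_bsearch, dif_neg (by omega : ¬ lo < hi)]
    exact ⟨hlh, h1, fun i hi' hw => h2 i (by omega) hw⟩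
  | succ n IH =>
    intro lo hi hf hlh hhl h1 h2
    by_cases h : lo < hi
    · rw [fosB_bsearch, dif_pos h]
      simp only
      by_cases hcmp : lst.getD ((lo + hi) / 2) 0 < pos
      · rw [if_pos hcmp]
        exact IH ((lo + hi) / 2 + 1) hi (by omega) (by omega) hhl
          (by intro i hi'
              rcases Nat.lt_or_ge i ((lo + hi) / 2) with h' | h'
              · rcases Nat.lt_or_ge i lo with h'' | h''
                · exact h1 i h''
                · exact lt_trans (getD_lt_getD lst hs i ((lo + hi) / 2) h' (by omega)) hcmp
              · have : i = (lo + hi) / 2 := by omega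
                rw [this]; exact hcmp)
          h2
      · rw [if_neg hcmp]
        obtain ⟨b, c, d⟩ := IH lo ((lo + hi) / 2) (by omega) (by omega) (by omega) h1
          (by intro i hi' hw
              rcases Nat.eq_or_lt_of_le hi' with rfl | hlt
              · omega
              · exact le_trans (le_of_not_gt hcmp) (le_of_lt (getD_lt_getD lst hs _ i hlt hw)))
        exact ⟨by omega, c, d⟩
    · rw [fosB_bsearch, dif_neg h]
      exact ⟨by omega, h1, fun i hi' hw => h2 i (by omega) hw⟩

lemma singleton_prefix_drop (t : List Char) (c : Char) (j : Nat) :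
    [c] <+: t.drop j ↔ t[j]? = some c := by
  rw [List.getElem?_eq_some_iff]
  constructor
  · intro h
    have hl : 1 ≤ (t.drop j).length := h.length_le
    have hj : j < t.length := by simp at hl; omega
    refine ⟨hj, ?_⟩
    have := List.drop_eq_getElem_cons hj
    rw [this] at h
    exact ((List.cons_prefix_cons.mp h).1).symm
  · rintro ⟨hj, hc⟩
    rw [List.drop_eq_getElem_cons hj, hc]
    simp

-- Main loop equivalence: both loops carry the same (pos, indices) state.
lemma fos_main (target : String) (qs : List Char) (k : Nat)
    (hk : k ≤ target.toList.length) (acc : List Int) :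
    fosA_go target qs (k : Int) acc = fosB_go (fosB_build target.toList) qs (k : Int) acc := by
  induction qs generalizing k acc with
  | nil => simp [fosA_go, fosB_go]
  | cons c qs IH =>
    set t := target.toList with ht
    simp only [fosA_go, fosB_go]
    rw [PySem.Str.findFrom_eq, String.toList_singleton, ← ht,
      PySem.Chars.findFrom_natCast t [c] k hk]
    rw [fosB_build_getD t c]
    set lst := fosOcc t c with hlst
    have hsorted := fosOcc_sorted t c
    rw [← hlst] at hsorted
    set r := fosB_bsearch lst (k : Int) 0 lst.length with hr
    obtain ⟨hr1, hr2, hr3⟩ := fosB_bsearch_inv lst (k : Int) hsorted lst.length 0 lst.length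
      (by omega) (by omega) (le_refl _) (by omega) (by intro i h1 h2; omega)
    rw [← hr] at hr1 hr2 hr3
    by_cases hcase : r = lst.length
    · -- no occurrence of c at an index ≥ k: A's find on the drop is -1, B's search hits the end
      have hno : PySem.Chars.find (t.drop k) [c] = -1 := by
        rw [PySem.Chars.find_eq_neg_one_iff]
        intro hinf
        obtain ⟨j, hjc⟩ := List.mem_iff_getElem?.mp ((List.singleton_infix_iff c _).mp hinf)
        have hmem : ((k + j : Nat) : Int) ∈ lst := by
          rw [hlst, mem_fosOcc]
          exact ⟨k + j, rfl, by rw [← List.getElem?_drop]; exact hjc⟩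
        obtain ⟨i, hieq⟩ := List.mem_iff_getElem?.mp hmem
        obtain ⟨hilen, hieq⟩ := List.getElem?_eq_some_iff.mp hieq
        have := hr2 i (by omega)
        rw [List.getD_eq_getElem _ _ hilen, hieq] at this
        omega
      rw [if_pos hno, if_pos rfl, if_pos hcase]
    · rw [if_neg hcase]
      have hrlt : r < lst.length := by omega
      obtain ⟨m, hxm, hmc⟩ := (mem_fosOcc t c (lst.getD r 0)).mp
        (by rw [List.getD_eq_getElem _ _ hrlt]; exact List.getElem_mem hrlt)
      have hkm : (k : Int) ≤ (m : Int) := hxm ▸ hr3 r (le_refl _) hrlt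
      have hkm' : k ≤ m := by exact_mod_cast hkm
      have hfind : PySem.Chars.find (t.drop k) [c] = ((m - k : Nat) : Int) := by
        have hinf : [c] <:+: t.drop k := (List.singleton_infix_iff c _).mpr
          (List.mem_iff_getElem?.mpr ⟨m - k, by
            rw [List.getElem?_drop, show k + (m - k) = m by omega]; exact hmc⟩)
        have hnn : 0 ≤ PySem.Chars.find (t.drop k) [c] :=
          (PySem.Chars.find_nonneg_iff _ _).mpr hinf
        obtain ⟨hpre, hmin⟩ := PySem.Chars.find_spec hnn
        set f' := (PySem.Chars.find (t.drop k) [c]).toNat with hf'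
        have hf'c : t[k + f']? = some c := by
          rw [← List.getElem?_drop]
          exact (singleton_prefix_drop (t.drop k) c f').mp hpre
        have h1 : f' ≤ m - k := by
          by_contra hgt
          exact hmin (m - k) (by omega) ((singleton_prefix_drop _ c _).mpr (by
            rw [List.getElem?_drop, show k + (m - k) = m by omega]; exact hmc))
        have h2 : m ≤ k + f' := by
          have hmem : ((k + f' : Nat) : Int) ∈ lst := by
            rw [hlst, mem_fosOcc]; exact ⟨k + f', rfl, hf'c⟩
          obtain ⟨i, hieq⟩ := List.mem_iff_getElem?.mp hmem
          obtain ⟨hilen, hieq⟩ := List.getElem?_eq_some_iff.mp hieq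
          have hir : r ≤ i := by
            by_contra hlt
            have := hr2 i (by omega)
            rw [List.getD_eq_getElem _ _ hilen, hieq] at this
            omega
          have hle : lst.getD r 0 ≤ lst.getD i 0 := by
            rcases Nat.eq_or_lt_of_le hir with rfl | hlt
            · exact le_refl _
            · exact le_of_lt (getD_lt_getD lst hsorted r i hlt hilen)
          rw [hxm, List.getD_eq_getElem _ _ hilen, hieq] at hle
          exact_mod_cast hle
        rw [show PySem.Chars.find (t.drop k) [c] = (f' : Int) from
          (Int.toNat_of_nonneg hnn).symm]
        congr 1
        omega
      rw [hfind]
      rw [if_neg (show ¬ (((m - k : Nat) : Int) = -1) by omega)]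
      rw [if_neg (show ¬ ((k : Int) + ((m - k : Nat) : Int) = -1) by omega)]
      have heq1 : (k : Int) + ((m - k : Nat) : Int) = lst.getD r 0 := by
        rw [hxm]; omega
      rw [heq1]
      have hmlen : m < t.length := by
        have := List.getElem?_eq_some_iff.mp hmc
        exact this.choose
      have heq2 : lst.getD r 0 + 1 = ((m + 1 : Nat) : Int) := by rw [hxm]; push_cast; ring
      rw [heq2, IH (m + 1) (by omega) (acc ++ [lst.getD r 0])]

-- ===== VERDICT (by name: the statement is the Claim_ definition above) =====
theorem find_ordered_subsequence_spec : Claim_equal_find_ordered_subsequence := by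
  intro query target _
  unfold Spec_find_ordered_subsequence find_ordered_subsequence find_ordered_subsequence_alt
  have := fos_main target query.toList 0 (by omega) []
  simpa using this
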